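-- pv_equiv track=rewrite | github.com/taijara/MinesweeperSolver | RegraProbabilidade.py | listarQuadradosLocal
-- ===== SOURCE A (Python) =====
-- def listarQuadradosLocal(n_linhas, n_colunas, tabuleiro):
--     contador = 0
--     listaQuadardos = {}
--     for i in range(n_linhas):
--         for j in range(n_colunas):
--             listaQuadardos.update({contador: (i, j)})
--             contador = contador + 1
--     return listaQuadardos
-- ===== SOURCE B (Python) =====
-- def listarQuadradosLocal(n_linhas, n_colunas, tabuleiro):
--     if n_linhas <= 0 or n_colunas <= 0:
--         return {}
--     return {k: divmod(k, n_colunas) for k in range(n_linhas * n_colunas)}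
-- ===== Notes on version B (the rewrite author's own statement) =====
-- stated objective: alternative
-- what changed: Replaces the two nested loops with an explicit running counter by a single flat comprehension over range(n_linhas*n_colunas) that recovers each coordinate pair in closed form via divmod(k, n_colunas), guarding non-positive dimensions to an empty dict.
import Mathlib
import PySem

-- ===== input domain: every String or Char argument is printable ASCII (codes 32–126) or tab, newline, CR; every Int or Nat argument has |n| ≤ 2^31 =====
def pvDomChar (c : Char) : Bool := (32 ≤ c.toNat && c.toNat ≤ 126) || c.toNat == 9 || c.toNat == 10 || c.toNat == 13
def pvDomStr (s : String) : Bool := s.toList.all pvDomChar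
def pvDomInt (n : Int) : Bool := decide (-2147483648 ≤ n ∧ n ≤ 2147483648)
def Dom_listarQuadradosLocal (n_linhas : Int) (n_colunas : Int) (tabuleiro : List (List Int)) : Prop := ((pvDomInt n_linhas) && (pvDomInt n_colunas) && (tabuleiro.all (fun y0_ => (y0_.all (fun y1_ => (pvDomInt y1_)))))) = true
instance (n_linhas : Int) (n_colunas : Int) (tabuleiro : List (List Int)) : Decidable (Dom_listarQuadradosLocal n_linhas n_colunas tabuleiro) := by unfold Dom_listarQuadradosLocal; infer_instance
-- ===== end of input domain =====

-- B replaces A's nested counter loops by one flat range with closed-form divmod coordinates (alternative decomposition, same cost).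

-- ===== PORT A =====
-- nested loops over rows and columns, a running counter, dict.update({contador: (i, j)})
def listarQuadradosLocal (n_linhas : Int) (n_colunas : Int) (tabuleiro : List (List Int)) : List (Int × Int × Int) :=
  let st :=
    (PySem.List.pyRange 0 n_linhas 1).foldl
      (fun (st : Int × PySem.Dict Int (Int × Int)) i =>
        (PySem.List.pyRange 0 n_colunas 1).foldl
          (fun st j => (st.1 + 1, st.2.insert st.1 (i, j))) st)
      (0, PySem.Dict.empty)
  st.2.items

-- ===== PORT B =====
-- guard non-positive dimensions, then one flat range with divmod(k, n_colunas)
def listarQuadradosLocal_alt (n_linhas : Int) (n_colunas : Int) (tabuleiro : List (List Int)) : List (Int × Int × Int) :=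
  if n_linhas ≤ 0 ∨ n_colunas ≤ 0 then []
  else
    (PySem.List.pyRange 0 (n_linhas * n_colunas) 1).map
      (fun k => (k, PySem.Int.floordiv k n_colunas, PySem.Int.mod k n_colunas))

-- ===== PRECONDITION & SPEC =====
def Spec_listarQuadradosLocal (n_linhas : Int) (n_colunas : Int) (tabuleiro : List (List Int)) (out : List (Int × Int × Int)) : Prop := out = listarQuadradosLocal_alt n_linhas n_colunas tabuleiro
instance (n_linhas : Int) (n_colunas : Int) (tabuleiro : List (List Int)) (out : List (Int × Int × Int)) : Decidable (Spec_listarQuadradosLocal n_linhas n_colunas tabuleiro out) := by unfold Spec_listarQuadradosLocal; infer_instance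

-- ===== CLAIM (what is proved, stated in full; the proofs are below) =====
def Claim_equal_listarQuadradosLocal : Prop := ∀ (n_linhas : Int) (n_colunas : Int) (tabuleiro : List (List Int)), Dom_listarQuadradosLocal n_linhas n_colunas tabuleiro → Spec_listarQuadradosLocal n_linhas n_colunas tabuleiro (listarQuadradosLocal n_linhas n_colunas tabuleiro)

-- ===== LEMMAS AND PROOFS =====

theorem foldl_fixed_state {α β : Type} (l : List β) (init : α) :
    l.foldl (fun st _ => st) init = init := by
  induction l generalizing init with
  | nil => rfl
  | cons x xs ih => exact ih init

-- the inner row loop: counter advances by c, the dict gains the c fresh pairs in order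
theorem inner_row (c : Nat) (i s : Int) (d : PySem.Dict Int (Int × Int))
    (hd : ∀ p ∈ d.items, p.1 < s) :
    (PySem.List.pyRange 0 (c : Int) 1).foldl
        (fun (st : Int × PySem.Dict Int (Int × Int)) j => (st.1 + 1, st.2.insert st.1 (i, j))) (s, d)
      = (s + c, PySem.Dict.mk (d.items ++ (List.range c).map (fun j : Nat => (s + (j : Int), (i, (j : Int)))))) := by
  induction c generalizing s d with
  | zero =>
    rw [Nat.cast_zero, PySem.List.pyRange_one_eq_nil (by omega : (0:Int) ≤ 0)]
    simp
  | succ n ih =>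
    have hsplit : PySem.List.pyRange 0 ((n:Int) + 1) 1
        = PySem.List.pyRange 0 (n:Int) 1 ++ [(n:Int)] :=
      PySem.List.pyRange_one_succ_right (by omega)
    rw [show ((n + 1 : Nat) : Int) = (n:Int) + 1 by push_cast; ring, hsplit,
        List.foldl_append, ih s d hd]
    simp only [List.foldl_cons, List.foldl_nil]
    have hfresh : (PySem.Dict.mk (d.items ++ (List.range n).map (fun j : Nat => (s + (j:Int), (i, (j:Int)))))).contains (s + (n:Int)) = false := by
      rw [PySem.Dict.contains_eq_decide_mem_keys]
      simp only [decide_eq_false_iff_not, PySem.Dict.keys]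
      intro hmem
      simp only [List.map_append, List.mem_append, List.map_map, List.mem_map,
        Function.comp] at hmem
      rcases hmem with ⟨p, hp, hpeq⟩ | ⟨j, hj, hjeq⟩
      · have := hd p hp; omega
      · simp only [List.mem_range] at hj
        have : s + (j:Int) = s + (n:Int) := hjeq
        omega
    have hins := PySem.Dict.items_insert_of_not_contains
      (d := PySem.Dict.mk (d.items ++ (List.range n).map (fun j : Nat => (s + (j:Int), (i, (j:Int))))))
      (k := s + (n:Int)) (v := (i, (n:Int))) hfresh
    refine Prod.ext (by push_cast; ring) (PySem.Dict.ext ?_)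
    show _ = d.items ++ _
    rw [hins]
    show (d.items ++ _) ++ _ = _
    rw [List.range_succ, List.map_append, List.append_assoc]
    rfl

-- the whole nested loop, for positive column count
theorem outer_rows (r : Nat) (c : Int) (hc : 0 < c) :
    (PySem.List.pyRange 0 (r : Int) 1).foldl
        (fun (st : Int × PySem.Dict Int (Int × Int)) i =>
          (PySem.List.pyRange 0 c 1).foldl
            (fun st j => (st.1 + 1, st.2.insert st.1 (i, j))) st)
        (0, PySem.Dict.empty)
      = ((r : Int) * c,
         PySem.Dict.mk ((PySem.List.pyRange 0 ((r : Int) * c) 1).map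
           (fun k => (k, PySem.Int.floordiv k c, PySem.Int.mod k c)))) := by
  induction r with
  | zero =>
    rw [Nat.cast_zero, PySem.List.pyRange_one_eq_nil (by omega : (0:Int) ≤ 0)]
    refine Prod.ext (by simp) (PySem.Dict.ext ?_)
    rw [PySem.List.pyRange_one_eq_nil (by simp : (0:Int)*c ≤ 0)]
    rfl
  | succ n ih =>
    rw [show ((n + 1 : Nat) : Int) = (n:Int) + 1 by push_cast; ring,
        PySem.List.pyRange_one_succ_right (by omega), List.foldl_append, ih]
    simp only [List.foldl_cons, List.foldl_nil]
    have hkeys : ∀ p ∈ (PySem.Dict.mk ((PySem.List.pyRange 0 ((n:Int) * c) 1).map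
        (fun k => (k, PySem.Int.floordiv k c, PySem.Int.mod k c)))).items, p.1 < (n:Int) * c := by
      intro p hp
      simp only [List.mem_map] at hp
      rcases hp with ⟨x, hx, rfl⟩
      exact ((PySem.List.mem_pyRange_one).1 hx).2
    rw [show (PySem.List.pyRange 0 c 1) = (PySem.List.pyRange 0 ((c.toNat : Nat) : Int) 1) by
          rw [Int.toNat_of_nonneg (by omega)],
        inner_row c.toNat (n:Int) ((n:Int) * c) _ hkeys]
    have hc' : ((c.toNat : Nat) : Int) = c := Int.toNat_of_nonneg (by omega)
    refine Prod.ext (by simp [hc']; ring) (PySem.Dict.ext ?_)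
    show _ ++ _ = List.map _ _
    have hsplit : PySem.List.pyRange 0 (((n:Int) + 1) * c) 1
        = PySem.List.pyRange 0 ((n:Int) * c) 1 ++ PySem.List.pyRange ((n:Int) * c) (((n:Int) + 1) * c) 1 := by
      apply PySem.List.pyRange_one_append
      · positivity
      · nlinarith
    rw [hsplit, List.map_append]
    congr 1
    have hrange : PySem.List.pyRange ((n:Int) * c) (((n:Int) + 1) * c) 1
        = (List.range c.toNat).map (fun k : Nat => (n:Int) * c + (k:Int)) := by
      rw [PySem.List.pyRange_one]
      have h1 : ((n:Int) + 1) * c - (n:Int) * c = c := by ring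
      rw [h1]
    rw [hrange, List.map_map]
    apply List.map_congr_left
    intro j hj
    simp only [List.mem_range] at hj
    have hj' : (j:Int) < c := by omega
    have hfd : PySem.Int.floordiv ((n:Int) * c + (j:Int)) c = (n:Int) := by
      rw [PySem.Int.floordiv_eq_iff_of_pos]
      · constructor <;> nlinarith [Int.natCast_nonneg j]
      · exact hc
    have hmd : PySem.Int.mod ((n:Int) * c + (j:Int)) c = (j:Int) := by
      have := PySem.Int.floordiv_mul_add_mod ((n:Int) * c + (j:Int)) c
      rw [hfd] at this
      omega
    simp [Function.comp, hfd, hmd]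

-- ===== VERDICT (by name: the statement is the Claim_ definition above) =====
theorem listarQuadradosLocal_spec : Claim_equal_listarQuadradosLocal := by
  intro n_linhas n_colunas tabuleiro _
  unfold Spec_listarQuadradosLocal listarQuadradosLocal listarQuadradosLocal_alt
  by_cases hr : n_linhas ≤ 0
  · rw [PySem.List.pyRange_one_eq_nil hr]
    simp [hr]
    rfl
  · by_cases hc : n_colunas ≤ 0
    · simp only [hr, hc, or_true, if_true]
      rw [show (fun (st : Int × PySem.Dict Int (Int × Int)) i =>
            (PySem.List.pyRange 0 n_colunas 1).foldl
              (fun st j => (st.1 + 1, st.2.insert st.1 (i, j))) st)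
          = (fun st _ => st) from funext fun st => funext fun i => by
            rw [PySem.List.pyRange_one_eq_nil hc]; rfl]
      rw [foldl_fixed_state]
      rfl
    · rw [if_neg (by omega)]
      rw [show n_linhas = ((n_linhas.toNat : Nat) : Int) from (Int.toNat_of_nonneg (by omega)).symm]
      rw [outer_rows n_linhas.toNat n_colunas (by omega)]
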